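-- pv_equiv track=rewrite | github.com/uniba-swt/ShaPE | jboockmann/shape/verifast.py | distribute_by_predicate_name
-- ===== SOURCE A (Python) =====
-- from typing import List, Optional
--
-- def distribute_by_predicate_name(rules: List[str]):
--     """
--     returns a list of lists where each sublist contains all rules sharing the
--     same predicate name.
--     """
--     name_to_rules = {}
--     for rule in rules:
--         name = rule.split(r"(")[0]
--         if name not in name_to_rules.keys():
--             name_to_rules[name] = []
--         name_to_rules[name].append(rule)
--     return name_to_rules
-- ===== SOURCE B (Python) =====
-- def distribute_by_predicate_name(rules):
--     """
--     returns a dict mapping each predicate name to the rules sharing it: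
--     one dedup pass over the keys, then one filter per distinct name.
--     """
--     names = list(dict.fromkeys(r.split("(")[0] for r in rules))
--     return {name: [r for r in rules if r.split("(")[0] == name] for name in names}
-- ===== Notes on version B (the rewrite author's own statement) =====
-- stated objective: alternative
-- what changed: Replaces the single dict-building pass (create-empty-then-append per rule) with a two-phase scheme: dedup the predicate names in first-occurrence order, then build each group by filtering the whole list per name.
import Mathlib
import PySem

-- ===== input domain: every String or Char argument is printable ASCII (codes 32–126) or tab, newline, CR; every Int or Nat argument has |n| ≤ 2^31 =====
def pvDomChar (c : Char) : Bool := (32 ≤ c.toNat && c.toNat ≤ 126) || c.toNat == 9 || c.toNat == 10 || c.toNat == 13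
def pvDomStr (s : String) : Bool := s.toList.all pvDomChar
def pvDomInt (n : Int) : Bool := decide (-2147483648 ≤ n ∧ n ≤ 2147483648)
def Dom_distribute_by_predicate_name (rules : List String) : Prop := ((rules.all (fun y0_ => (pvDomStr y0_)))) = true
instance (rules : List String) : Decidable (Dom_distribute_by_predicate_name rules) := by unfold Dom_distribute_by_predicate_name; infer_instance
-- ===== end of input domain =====

-- B replaces A's single dict-building pass by dedup-the-names then one filter per name (alternative decomposition, same results).


-- ===== PORT A =====
-- rule.split("(")[0]: split never returns an empty list, so [0] is its head
def pvKeyA (rule : String) : String := ((PySem.Str.split? rule "(").getD []).headD ""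

def distribute_by_predicate_name (rules : List String) : List (String × List String) :=
  (rules.foldl (fun (d : PySem.Dict String (List String)) rule =>
      let name := pvKeyA rule
      let d := if d.contains name then d else d.insert name []
      d.insert name (d.getD name [] ++ [rule])) PySem.Dict.empty).items

-- ===== PORT B =====
def pvKeyB (rule : String) : String := ((PySem.Str.split? rule "(").getD []).headD ""

def distribute_by_predicate_name_alt (rules : List String) : List (String × List String) :=
  (PySem.List.dedup (rules.map pvKeyB)).map
    (fun name => (name, rules.filter (fun r => pvKeyB r == name)))

-- ===== PRECONDITION & SPEC =====
def Spec_distribute_by_predicate_name (rules : List String) (out : List (String × List String)) : Prop := out = distribute_by_predicate_name_alt rules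
instance (rules : List String) (out : List (String × List String)) : Decidable (Spec_distribute_by_predicate_name rules out) := by unfold Spec_distribute_by_predicate_name; infer_instance

-- ===== CLAIM (what is proved, stated in full; the proofs are below) =====
def Claim_equal_distribute_by_predicate_name : Prop := ∀ (rules : List String), Dom_distribute_by_predicate_name rules → Spec_distribute_by_predicate_name rules (distribute_by_predicate_name rules)

-- ===== LEMMAS AND PROOFS =====

-- A's loop body is exactly d[name] = d.get(name, []) + [rule]
theorem pv_step_eq (d : PySem.Dict String (List String)) (rule : String) :
    (let name := pvKeyA rule
     let d' := if d.contains name then d else d.insert name []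
     d'.insert name (d'.getD name [] ++ [rule]))
    = d.modify (pvKeyA rule) [] (· ++ [rule]) := by
  by_cases h : d.contains (pvKeyA rule) = true
  · simp only [h, if_pos]
    rfl
  · simp only [h, if_neg, Bool.not_eq_true]
    rw [show (d.modify (pvKeyA rule) [] (· ++ [rule])) = d.insert (pvKeyA rule) (d.getD (pvKeyA rule) [] ++ [rule]) from rfl]
    rw [PySem.Dict.getD_insert_self, PySem.Dict.insert_insert_self,
        PySem.Dict.getD_of_not_contains d [] (by simpa using h)]

theorem pv_fold_items (rules : List String) :
    (rules.foldl (fun (d : PySem.Dict String (List String)) rule =>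
        d.modify (pvKeyA rule) [] (· ++ [rule])) PySem.Dict.empty).items
    = (PySem.List.dedup (rules.map pvKeyA)).map
        (fun name => (name, rules.filter (fun r => pvKeyA r == name))) := by
  set D := rules.foldl (fun (d : PySem.Dict String (List String)) rule =>
      d.modify (pvKeyA rule) [] (· ++ [rule])) PySem.Dict.empty with hD
  have hnodup : D.keys.Nodup := by
    rw [hD]
    exact PySem.Dict.nodup_keys_foldl_modify_key rules pvKeyA []
      (fun d x => (· ++ [x])) PySem.Dict.empty (by simp [PySem.Dict.keys_empty])
  have hkeys : D.keys = PySem.List.dedup (rules.map pvKeyA) := by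
    rw [hD, PySem.Dict.keys_foldl_modify_key]
    simp [PySem.Dict.keys_empty, PySem.List.dedup_eq_ofList, PySem.Set.update,
      PySem.Set.ofList_eq_foldl]
  have hgetD : ∀ k, D.getD k [] = rules.filter (fun r => pvKeyA r == k) := by
    intro k
    have hmap : D = (rules.map (fun r => (pvKeyA r, r))).foldl
        (fun d p => d.modify p.1 [] (· ++ [p.2])) PySem.Dict.empty := by
      rw [hD, List.foldl_map]
    rw [hmap, PySem.Dict.getD_foldl_modify_append]
    simp [List.filter_map, Function.comp_def]
  rw [PySem.Dict.items_eq_map_keys D hnodup [], hkeys]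
  exact List.map_congr_left (fun k _ => by rw [hgetD k])

-- ===== VERDICT (by name: the statement is the Claim_ definition above) =====
theorem distribute_by_predicate_name_spec : Claim_equal_distribute_by_predicate_name := by
  intro rules _
  show distribute_by_predicate_name rules = distribute_by_predicate_name_alt rules
  unfold distribute_by_predicate_name distribute_by_predicate_name_alt
  have hk : pvKeyB = pvKeyA := rfl
  rw [hk]
  rw [show (rules.foldl (fun (d : PySem.Dict String (List String)) rule =>
      let name := pvKeyA rule
      let d := if d.contains name then d else d.insert name []
      d.insert name (d.getD name [] ++ [rule])) PySem.Dict.empty)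
    = rules.foldl (fun (d : PySem.Dict String (List String)) rule =>
      d.modify (pvKeyA rule) [] (· ++ [rule])) PySem.Dict.empty
    from PySem.List.foldl_congr_mem _ _ _ _ (fun acc x _ => pv_step_eq acc x)]
  exact pv_fold_items rules
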